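-- pv_equiv track=rewrite | github.com/tagore8661/accenture-coding-practice | Previous-Coding-Questions/Question-05.py | maximize_pair_product
-- ===== SOURCE A (Python) =====
-- def maximize_pair_product(N, A):
--     max_product = -1  # Initialize with a negative value to track the max product
--     result_pair = []  # To store the resulting pair
--
--     # Iterate through all possible pairs in the array
--     for i in range(N):
--         for j in range(N):
--             # Ensure it's not the same element and check sum condition
--             if i != j and A[i] + A[j] == 18 and A[i] > A[j]:
--                 product = A[i] * A[j]  # Calculate product
--
--                 # Update if the current product is greater than max_product
--                 if product > max_product:
--                     max_product = product
--                     result_pair = [A[i], A[j]]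
--
--     return result_pair
-- ===== SOURCE B (Python) =====
-- def maximize_pair_product(N, A):
--     # O(N): hash the first N values; the pair summing to 18 with the largest
--     # product a*(18-a) (a>9, product>=0) is the one with the smallest a in 10..18.
--     if N <= 0:
--         return []
--     present = set(A[:N])
--     for a in range(10, 19):
--         if a in present and 18 - a in present:
--             return [a, 18 - a]
--     return []
-- ===== Notes on version B (the rewrite author's own statement) =====
-- stated objective: faster
-- what changed: Replaces the O(N^2) double scan over index pairs with a hash set of the first N values and a constant 9-candidate scan a=10..18 checking whether 18-a is present, returning the first hit (minimal a maximizes a*(18-a)).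
import Mathlib
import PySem

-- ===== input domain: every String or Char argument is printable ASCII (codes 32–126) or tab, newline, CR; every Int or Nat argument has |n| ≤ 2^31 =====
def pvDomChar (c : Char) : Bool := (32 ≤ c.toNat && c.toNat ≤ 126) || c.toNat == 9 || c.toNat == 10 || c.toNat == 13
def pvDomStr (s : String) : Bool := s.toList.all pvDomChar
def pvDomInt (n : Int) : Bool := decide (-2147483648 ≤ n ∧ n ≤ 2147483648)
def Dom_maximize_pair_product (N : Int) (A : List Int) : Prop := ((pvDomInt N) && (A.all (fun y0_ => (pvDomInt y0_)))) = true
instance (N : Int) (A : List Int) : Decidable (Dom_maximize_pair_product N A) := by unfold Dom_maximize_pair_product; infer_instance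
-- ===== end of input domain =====

-- B replaces A's O(N^2) scan over index pairs by a hash set of the first N values
-- and a 9-candidate scan a = 10..18 (first hit = maximal product a*(18-a)).

-- ===== PORT A =====
-- literal transliteration of A's nested index loops; A[i]/A[j] as pyGetD (in range under Pre_)
def maximize_pair_product (N : Int) (A : List Int) : List Int :=
  ((PySem.List.pyRange 0 N 1).foldl (fun s i =>
      (PySem.List.pyRange 0 N 1).foldl (fun s j =>
        if i ≠ j ∧ PySem.List.pyGetD A i 0 + PySem.List.pyGetD A j 0 = 18 ∧
            PySem.List.pyGetD A i 0 > PySem.List.pyGetD A j 0 then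
          (if PySem.List.pyGetD A i 0 * PySem.List.pyGetD A j 0 > s.1 then
            (PySem.List.pyGetD A i 0 * PySem.List.pyGetD A j 0,
             [PySem.List.pyGetD A i 0, PySem.List.pyGetD A j 0])
          else s)
        else s) s)
    ((-1 : Int), ([] : List Int))).2

-- ===== PORT B =====
def maximize_pair_product_alt (N : Int) (A : List Int) : List Int :=
  if N ≤ 0 then []
  else
    match (PySem.List.pyRange 10 19 1).find?
        (fun a => PySem.Set.contains (PySem.Set.ofList (PySem.List.slice A none (some N))) a &&
          PySem.Set.contains (PySem.Set.ofList (PySem.List.slice A none (some N))) (18 - a)) with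
    | some a => [a, 18 - a]
    | none => []

-- ===== PRECONDITION & SPEC =====
-- A raises IndexError whenever N > len(A), except for N = 1, A = [] where the i != j
-- test short-circuits before any indexing and A returns [].
def Pre_maximize_pair_product (N : Int) (A : List Int) : Prop :=
  N ≤ (A.length : Int) ∨ (N = 1 ∧ A = [])
instance (N : Int) (A : List Int) : Decidable (Pre_maximize_pair_product N A) := by
  unfold Pre_maximize_pair_product; infer_instance

def pvWitness_maximize_pair_product : Int × List Int := (2, [8, 10])

def Spec_maximize_pair_product (N : Int) (A : List Int) (out : List Int) : Prop :=
  out = maximize_pair_product_alt N A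
instance (N : Int) (A : List Int) (out : List Int) : Decidable (Spec_maximize_pair_product N A out) := by
  unfold Spec_maximize_pair_product; infer_instance

-- ===== CLAIM (what is proved, stated in full; the proofs are below) =====
def Claim_equal_maximize_pair_product : Prop := ∀ (N : Int) (A : List Int), Dom_maximize_pair_product N A → Pre_maximize_pair_product N A → Spec_maximize_pair_product N A (maximize_pair_product N A)

-- ===== LEMMAS AND PROOFS =====

-- A's loop body on the pair of VALUES (a, b) (the i ≠ j test is redundant once a > b)
def pvF (s : Int × List Int) (a b : Int) : Int × List Int :=
  if a + b = 18 ∧ a > b then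
    (if a * b > s.1 then (a * b, [a, b]) else s) else s

-- abstract state: the current best candidate a (none = nothing found yet)
def pvG : Option Int → Int × List Int
  | none => ((-1 : Int), ([] : List Int))
  | some v => (v * (18 - v), [v, 18 - v])

def pvOmin : Option Int → Int → Option Int
  | none, a => some a
  | some v, a => some (min a v)

def pvUpd (o : Option Int) (a b : Int) : Option Int :=
  if b = 18 - a ∧ 10 ≤ a ∧ a ≤ 18 then pvOmin o a else o

def pvInv (o : Option Int) : Prop := ∀ v, o = some v → 10 ≤ v ∧ v ≤ 18

lemma pvInv_none : pvInv none := by intro v h; cases h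

lemma pvProd_neg1 (a : Int) (ha : 10 ≤ a) : a * (18 - a) > -1 ↔ a ≤ 18 := by
  constructor
  · intro h; nlinarith
  · intro h; nlinarith

lemma pvProd_lt (a v : Int) (ha : 10 ≤ a) (hv1 : 10 ≤ v) (hv2 : v ≤ 18) :
    a * (18 - a) > v * (18 - v) ↔ a ≤ 18 ∧ a < v := by
  constructor
  · intro h
    constructor
    · by_contra h18; push Not at h18; nlinarith
    · by_contra hav; push Not at hav; nlinarith
  · rintro ⟨h18, hav⟩; nlinarith

lemma pvStep_sim (o : Option Int) (a b : Int) (h : pvInv o) :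
    pvF (pvG o) a b = pvG (pvUpd o a b) ∧ pvInv (pvUpd o a b) := by
  unfold pvF pvUpd
  by_cases hc : a + b = 18 ∧ a > b
  · have hb : b = 18 - a := by omega
    have ha : 10 ≤ a := by omega
    subst hb
    rcases o with _ | v
    · by_cases h18 : a ≤ 18
      · have hgt : a * (18 - a) > (pvG none).1 := by
          simpa [pvG] using (pvProd_neg1 a ha).mpr h18
        rw [if_pos hc, if_pos hgt, if_pos ⟨rfl, ha, h18⟩]
        refine ⟨by simp [pvG, pvOmin], ?_⟩
        intro v hv; simp [pvOmin] at hv; omega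
      · have hgt : ¬ a * (18 - a) > (pvG none).1 := by
          simpa [pvG] using fun hh => h18 ((pvProd_neg1 a ha).mp hh)
        rw [if_pos hc, if_neg hgt, if_neg (by intro hh; exact h18 hh.2.2)]
        exact ⟨rfl, pvInv_none⟩
    · obtain ⟨hv1, hv2⟩ := h v rfl
      by_cases hlt : a ≤ 18 ∧ a < v
      · have hgt : a * (18 - a) > (pvG (some v)).1 := by
          simpa [pvG] using (pvProd_lt a v ha hv1 hv2).mpr hlt
        rw [if_pos hc, if_pos hgt, if_pos ⟨rfl, ha, hlt.1⟩]
        have hmin : min a v = a := min_eq_left (le_of_lt hlt.2)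
        refine ⟨by simp [pvG, pvOmin, hmin], ?_⟩
        intro w hw; simp [pvOmin, hmin] at hw; omega
      · have hgt : ¬ a * (18 - a) > (pvG (some v)).1 := by
          simpa [pvG] using fun hh => hlt ((pvProd_lt a v ha hv1 hv2).mp hh)
        rw [if_pos hc, if_neg hgt]
        by_cases h18 : a ≤ 18
        · have hva : v ≤ a := by
            by_contra hva; push Not at hva; exact hlt ⟨h18, hva⟩
          have hmin : min a v = v := min_eq_right hva
          rw [if_pos ⟨rfl, ha, h18⟩]
          refine ⟨by simp [pvG, pvOmin, hmin], ?_⟩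
          intro w hw; simp [pvOmin, hmin] at hw; omega
        · rw [if_neg (by intro hh; exact h18 hh.2.2)]
          exact ⟨rfl, h⟩
  · rw [if_neg hc, if_neg (by intro hh; exact hc ⟨by omega, by omega⟩)]
    exact ⟨rfl, h⟩

lemma pvFold_sim {α : Type} (g : Int × List Int → α → Int × List Int)
    (h : Option Int → α → Option Int)
    (H : ∀ o a, pvInv o → g (pvG o) a = pvG (h o a) ∧ pvInv (h o a)) :
    ∀ (l : List α) (o : Option Int), pvInv o →
      l.foldl g (pvG o) = pvG (l.foldl h o) ∧ pvInv (l.foldl h o) := by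
  intro l
  induction l with
  | nil => intro o ho; exact ⟨rfl, ho⟩
  | cons x xs ih =>
      intro o ho
      have h1 := H o x ho
      simp only [List.foldl_cons, h1.1]
      exact ih (h o x) h1.2

lemma pvOmin_idem (o : Option Int) (a : Int) : pvOmin (pvOmin o a) a = pvOmin o a := by
  cases o <;> simp [pvOmin]

lemma pvInner_char (a : Int) :
    ∀ (bs : List Int) (o : Option Int),
      bs.foldl (fun o b => pvUpd o a b) o =
        if 10 ≤ a ∧ a ≤ 18 ∧ (18 - a) ∈ bs then pvOmin o a else o := by
  intro bs
  induction bs with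
  | nil => intro o; simp
  | cons b bs ih =>
      intro o
      simp only [List.foldl_cons]
      by_cases hb : b = 18 - a ∧ 10 ≤ a ∧ a ≤ 18
      · rw [show pvUpd o a b = pvOmin o a from by unfold pvUpd; rw [if_pos hb]]
        rw [ih]
        have hmem : (18 - a) ∈ b :: bs := by rw [← hb.1]; exact List.mem_cons_self
        split_ifs with h1 h2 h2
        · exact pvOmin_idem o a
        · exact absurd ⟨hb.2.1, hb.2.2, hmem⟩ h2
        · rfl
        · exact absurd ⟨hb.2.1, hb.2.2, hmem⟩ h2
      · rw [show pvUpd o a b = o from by unfold pvUpd; rw [if_neg hb]]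
        rw [ih]
        have hiff : (10 ≤ a ∧ a ≤ 18 ∧ (18 - a) ∈ bs) ↔ (10 ≤ a ∧ a ≤ 18 ∧ (18 - a) ∈ b :: bs) := by
          constructor
          · rintro ⟨h1, h2, h3⟩; exact ⟨h1, h2, List.mem_cons_of_mem _ h3⟩
          · rintro ⟨h1, h2, h3⟩
            rcases List.mem_cons.mp h3 with he | hm
            · exact absurd ⟨he.symm, h1, h2⟩ hb
            · exact ⟨h1, h2, hm⟩
        rw [if_congr hiff rfl rfl]

lemma pvFilter_fold (p : Int → Bool) :
    ∀ (l : List Int) (o : Option Int),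
      l.foldl (fun o a => if p a then pvOmin o a else o) o = (l.filter p).foldl pvOmin o := by
  intro l
  induction l with
  | nil => intro o; rfl
  | cons x xs ih =>
      intro o
      by_cases hx : p x <;> simp [hx, ih]

lemma pvFold_min_some : ∀ (l : List Int) (x : Int),
    l.foldl pvOmin (some x) = some (l.foldl min x) := by
  intro l
  induction l with
  | nil => intro x; rfl
  | cons y ys ih => intro x; simp [pvOmin, ih, min_comm]

lemma pvFold_min_none (l : List Int) : l.foldl pvOmin none = l.min? := by
  cases l with
  | nil => rfl
  | cons x xs => simp [pvOmin, pvFold_min_some, List.min?]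

lemma pvFind_sorted_some {l : List Int} {p : Int → Bool} (hs : l.Pairwise (· < ·)) {m : Int}
    (hm : m ∈ l) (hpm : p m = true) (hmin : ∀ x ∈ l, p x = true → m ≤ x) :
    l.find? p = some m := by
  induction l with
  | nil => cases hm
  | cons x xs ih =>
      by_cases hx : p x = true
      · have hmx : m ≤ x := hmin x (List.mem_cons_self) hx
        have hxm : x = m := by
          rcases List.mem_cons.mp hm with h | h
          · omega
          · have := (List.pairwise_cons.mp hs).1 m h; omega
        rw [List.find?_cons_of_pos hx, hxm]
      · have hm' : m ∈ xs := by
          rcases List.mem_cons.mp hm with h | h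
          · exact absurd hpm (by simp [h, hx])
          · exact h
        rw [List.find?_cons_of_neg (by simp [hx])]
        exact ih (List.pairwise_cons.mp hs).2 hm'
          (fun y hy hpy => hmin y (List.mem_cons_of_mem _ hy) hpy)

lemma pvGetD_take (xs : List Int) (n : Nat) (i : Int) (d : Int)
    (h0 : 0 ≤ i) (h : i < (n : Int)) :
    PySem.List.pyGetD (xs.take n) i d = PySem.List.pyGetD xs i d := by
  have hi : i = ((i.toNat : Nat) : Int) := by omega
  have hk : i.toNat < n := by omega
  rw [hi, PySem.List.pyGetD_natCast, PySem.List.pyGetD_natCast]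
  simp [List.getD_eq_getElem?_getD, hk]

-- A's value, reduced to the nested VALUE fold over vals = A[:N]  (0 < N ≤ len A)
lemma pvA_eq_valsfold (N : Int) (A : List Int) (h0 : 0 < N) (hlen : N ≤ (A.length : Int)) :
    maximize_pair_product N A =
      ((A.take N.toNat).foldl (fun s a => (A.take N.toNat).foldl (fun s b => pvF s a b) s)
        ((-1 : Int), ([] : List Int))).2 := by
  unfold maximize_pair_product
  set vals := A.take N.toNat with hv
  have hN : ((vals.length : Nat) : Int) = N := by
    simp [hv, List.length_take]; omega
  congr 1
  have houter : ∀ (s : Int × List Int) (i : Int), i ∈ PySem.List.pyRange 0 N 1 →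
      (PySem.List.pyRange 0 N 1).foldl (fun s j =>
        if i ≠ j ∧ PySem.List.pyGetD A i 0 + PySem.List.pyGetD A j 0 = 18 ∧
            PySem.List.pyGetD A i 0 > PySem.List.pyGetD A j 0 then
          (if PySem.List.pyGetD A i 0 * PySem.List.pyGetD A j 0 > s.1 then
            (PySem.List.pyGetD A i 0 * PySem.List.pyGetD A j 0,
             [PySem.List.pyGetD A i 0, PySem.List.pyGetD A j 0])
          else s)
        else s) s =
      vals.foldl (fun s b => pvF s (PySem.List.pyGetD vals i 0) b) s := by
    intro s i hi
    obtain ⟨hi0, hiN⟩ := PySem.List.mem_pyRange_one.mp hi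
    have hstep : ∀ (s' : Int × List Int) (j : Int), j ∈ PySem.List.pyRange 0 N 1 →
        (if i ≠ j ∧ PySem.List.pyGetD A i 0 + PySem.List.pyGetD A j 0 = 18 ∧
            PySem.List.pyGetD A i 0 > PySem.List.pyGetD A j 0 then
          (if PySem.List.pyGetD A i 0 * PySem.List.pyGetD A j 0 > s'.1 then
            (PySem.List.pyGetD A i 0 * PySem.List.pyGetD A j 0,
             [PySem.List.pyGetD A i 0, PySem.List.pyGetD A j 0])
          else s')
        else s') =
        pvF s' (PySem.List.pyGetD vals i 0) (PySem.List.pyGetD vals j 0) := by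
      intro s' j hj
      obtain ⟨hj0, hjN⟩ := PySem.List.mem_pyRange_one.mp hj
      rw [pvGetD_take A N.toNat i 0 hi0 (by omega), pvGetD_take A N.toNat j 0 hj0 (by omega)]
      by_cases hij : i = j
      · subst hij
        simp [pvF]
      · simp [pvF, hij]
    rw [PySem.List.foldl_congr_mem _ _
      (fun s' j => pvF s' (PySem.List.pyGetD vals i 0)
        (PySem.List.pyGetD vals j 0)) _ hstep]
    rw [← hN]
    exact PySem.List.foldl_pyRange_zero_pyGetD' vals 0
      (fun acc b => pvF acc (PySem.List.pyGetD vals i 0) b) s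
  rw [PySem.List.foldl_congr_mem _ _
    (fun s i => vals.foldl
      (fun s b => pvF s (PySem.List.pyGetD vals i 0) b) s) _ houter]
  rw [← hN]
  exact PySem.List.foldl_pyRange_zero_pyGetD' vals 0
    (fun acc a => vals.foldl (fun s b => pvF s a b) acc) ((-1 : Int), ([] : List Int))

-- the whole pipeline: A's value = pvG of the min over the candidate set
lemma pvA_char (N : Int) (A : List Int) (h0 : 0 < N) (hlen : N ≤ (A.length : Int)) :
    maximize_pair_product N A =
      (pvG (((A.take N.toNat).filter
        (fun a => decide (10 ≤ a ∧ a ≤ 18 ∧ (18 - a) ∈ A.take N.toNat))).min?)).2 := by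
  rw [pvA_eq_valsfold N A h0 hlen]
  set vals := A.take N.toNat with hv
  have Hin : ∀ (o : Option Int) (a : Int), pvInv o →
      vals.foldl (fun s b => pvF s a b) (pvG o) =
        pvG (vals.foldl (fun o b => pvUpd o a b) o) ∧
      pvInv (vals.foldl (fun o b => pvUpd o a b) o) :=
    fun o a ho => pvFold_sim (fun s b => pvF s a b) (fun o b => pvUpd o a b)
      (fun o' b ho' => pvStep_sim o' a b ho') vals o ho
  have Hout := pvFold_sim
    (fun s a => vals.foldl (fun s b => pvF s a b) s)
    (fun o a => vals.foldl (fun o b => pvUpd o a b) o)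
    Hin vals none pvInv_none
  rw [show ((-1 : Int), ([] : List Int)) = pvG none from rfl, Hout.1]
  congr 2
  have hstep : (fun (o : Option Int) (a : Int) => vals.foldl (fun o b => pvUpd o a b) o) =
      fun o a => if (decide (10 ≤ a ∧ a ≤ 18 ∧ (18 - a) ∈ vals)) = true
        then pvOmin o a else o := by
    funext o a
    rw [pvInner_char a vals o]
    simp
  rw [hstep, pvFilter_fold, pvFold_min_none]

-- ===== VERDICT (by name: the statement is the Claim_ definition above) =====
theorem maximize_pair_product_spec : Claim_equal_maximize_pair_product := by
  intro N A _ hpre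
  unfold Spec_maximize_pair_product
  by_cases hN0 : N ≤ 0
  · unfold maximize_pair_product maximize_pair_product_alt
    rw [PySem.List.pyRange_one_eq_nil (by omega : N ≤ 0), if_pos hN0]
    rfl
  · have h0 : 0 < N := by omega
    rcases hpre with hlen | ⟨h1, h2⟩
    swap
    · subst h1; subst h2; decide
    rw [pvA_char N A h0 hlen]
    unfold maximize_pair_product_alt
    rw [if_neg hN0, PySem.List.slice_to A (le_of_lt (by omega : (0:Int) < N))]
    set vals := A.take N.toNat with hv
    have hcont : ∀ x : Int,
        (PySem.Set.contains (PySem.Set.ofList vals) x = true) ↔ x ∈ vals := by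
      intro x; simp [PySem.Set.contains]
    rcases hmin : (vals.filter
        (fun a => decide (10 ≤ a ∧ a ≤ 18 ∧ (18 - a) ∈ vals))).min? with _ | m
    · have hfe := List.min?_eq_none_iff.mp hmin
      have hnone : (PySem.List.pyRange 10 19 1).find?
          (fun a => PySem.Set.contains (PySem.Set.ofList vals) a &&
            PySem.Set.contains (PySem.Set.ofList vals) (18 - a)) = none := by
        apply List.find?_eq_none.mpr
        intro x hx hpx
        obtain ⟨hx1, hx2⟩ := PySem.List.mem_pyRange_one.mp hx
        rw [Bool.and_eq_true, hcont x, hcont (18 - x)] at hpx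
        have hxf : x ∈ vals.filter
            (fun a => decide (10 ≤ a ∧ a ≤ 18 ∧ (18 - a) ∈ vals)) := by
          rw [List.mem_filter]
          exact ⟨hpx.1, by simp; exact ⟨hx1, by omega, hpx.2⟩⟩
        rw [hfe] at hxf
        cases hxf
      rw [hnone]
      rfl
    · obtain ⟨hmf, hmle⟩ := List.min?_eq_some_iff.mp hmin
      obtain ⟨hmv, hmq⟩ := List.mem_filter.mp hmf
      have hq : 10 ≤ m ∧ m ≤ 18 ∧ (18 - m) ∈ vals := by simpa using hmq
      have hsome : (PySem.List.pyRange 10 19 1).find?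
          (fun a => PySem.Set.contains (PySem.Set.ofList vals) a &&
            PySem.Set.contains (PySem.Set.ofList vals) (18 - a)) = some m := by
        apply pvFind_sorted_some (PySem.List.pairwise_lt_pyRange_one 10 19)
        · exact PySem.List.mem_pyRange_one.mpr ⟨hq.1, by omega⟩
        · rw [Bool.and_eq_true, hcont m, hcont (18 - m)]
          exact ⟨hmv, hq.2.2⟩
        · intro x hx hpx
          obtain ⟨hx1, hx2⟩ := PySem.List.mem_pyRange_one.mp hx
          rw [Bool.and_eq_true, hcont x, hcont (18 - x)] at hpx
          exact hmle x (List.mem_filter.mpr ⟨hpx.1, by simp; exact ⟨hx1, by omega, hpx.2⟩⟩)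
      rw [hsome]
      rfl
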